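-- pv_equiv track=rewrite | github.com/maalitars/sentiment_analysis | sentiment.py | otsime_sagedused
-- ===== SOURCE A (Python) =====
-- from collections import defaultdict,Counter
--
-- def otsime_sagedused(meeleolu_sagedused, meeleolu_unikaalne_hulk):
--     sagedustega = defaultdict(list)
--     for i in meeleolu_unikaalne_hulk:
--         for a in meeleolu_sagedused:
--             for b in meeleolu_sagedused[a]:
--                 if b[0] == i:
--                     sagedustega[a].append(b)
--     return sagedustega
-- ===== SOURCE B (Python) =====
-- from collections import defaultdict
--
-- def otsime_sagedused(meeleolu_sagedused, meeleolu_unikaalne_hulk):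
--     # one pass: bucket every (key, tuple) pair by its sentiment b[0]
--     bysent = defaultdict(list)
--     for a in meeleolu_sagedused:
--         for b in meeleolu_sagedused[a]:
--             bysent[b[0]].append((a, b))
--     # emit in unique-sentiment order, no rescan of the input
--     sagedustega = defaultdict(list)
--     for i in meeleolu_unikaalne_hulk:
--         for a, b in bysent[i]:
--             sagedustega[a].append(b)
--     return sagedustega
-- ===== Notes on version B (the rewrite author's own statement) =====
-- stated objective: faster
-- what changed: Instead of rescanning every entry of the dict for each unique sentiment, B buckets all (key, tuple) pairs by sentiment in a single pass and then emits each sentiment's bucket directly, removing the inner scans.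
import Mathlib
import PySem

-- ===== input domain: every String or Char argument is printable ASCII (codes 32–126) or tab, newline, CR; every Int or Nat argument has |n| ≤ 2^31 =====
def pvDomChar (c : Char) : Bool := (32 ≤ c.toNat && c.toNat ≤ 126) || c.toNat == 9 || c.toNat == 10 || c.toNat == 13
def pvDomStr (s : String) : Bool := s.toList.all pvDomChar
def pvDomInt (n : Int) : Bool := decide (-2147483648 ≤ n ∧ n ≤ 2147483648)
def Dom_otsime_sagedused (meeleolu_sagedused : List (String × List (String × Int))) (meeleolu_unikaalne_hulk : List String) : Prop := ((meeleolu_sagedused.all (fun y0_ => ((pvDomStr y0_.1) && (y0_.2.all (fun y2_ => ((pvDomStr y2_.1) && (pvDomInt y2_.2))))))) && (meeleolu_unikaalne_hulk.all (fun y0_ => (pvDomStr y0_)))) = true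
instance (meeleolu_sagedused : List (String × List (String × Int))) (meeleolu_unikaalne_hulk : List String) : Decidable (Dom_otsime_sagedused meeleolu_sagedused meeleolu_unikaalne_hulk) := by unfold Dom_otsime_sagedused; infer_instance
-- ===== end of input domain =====

-- B buckets all (key, tuple) pairs by sentiment in one pass and emits each sentiment's
-- bucket directly, instead of A's rescan of the whole dict per unique sentiment (objective: faster).

-- ===== PORT A =====
-- for i in unique: for a in dict: for b in dict[a]: if b[0]==i: res[a].append(b)
def otsime_sagedused (meeleolu_sagedused : List (String × List (String × Int))) (meeleolu_unikaalne_hulk : List String) : List (String × List (String × Int)) :=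
  (meeleolu_unikaalne_hulk.foldl (fun res i =>
      meeleolu_sagedused.foldl (fun res a =>
        a.2.foldl (fun res b =>
          if b.1 == i then res.modify a.1 [] (· ++ [b]) else res) res) res)
    (PySem.Dict.empty)).items

-- ===== PORT B =====
def otsime_sagedused_alt (meeleolu_sagedused : List (String × List (String × Int))) (meeleolu_unikaalne_hulk : List String) : List (String × List (String × Int)) :=
  -- bysent[b[0]].append((a, b)) for each a, b
  let bysent : PySem.Dict String (List (String × (String × Int))) :=
    meeleolu_sagedused.foldl (fun bs a =>
      a.2.foldl (fun bs b => bs.modify b.1 [] (· ++ [(a.1, b)])) bs) PySem.Dict.empty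
  -- for i in unique: for (a, b) in bysent[i]: res[a].append(b)
  (meeleolu_unikaalne_hulk.foldl (fun res i =>
      (bysent.getD i []).foldl (fun res ab => res.modify ab.1 [] (· ++ [ab.2])) res)
    (PySem.Dict.empty)).items

-- ===== PRECONDITION & SPEC =====
def Spec_otsime_sagedused (meeleolu_sagedused : List (String × List (String × Int))) (meeleolu_unikaalne_hulk : List String) (out : List (String × List (String × Int))) : Prop := out = otsime_sagedused_alt meeleolu_sagedused meeleolu_unikaalne_hulk
instance (meeleolu_sagedused : List (String × List (String × Int))) (meeleolu_unikaalne_hulk : List String) (out : List (String × List (String × Int))) : Decidable (Spec_otsime_sagedused meeleolu_sagedused meeleolu_unikaalne_hulk out) := by unfold Spec_otsime_sagedused; infer_instance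

-- ===== CLAIM (what is proved, stated in full; the proofs are below) =====
def Claim_equal_otsime_sagedused : Prop := ∀ (meeleolu_sagedused : List (String × List (String × Int))) (meeleolu_unikaalne_hulk : List String), Dom_otsime_sagedused meeleolu_sagedused meeleolu_unikaalne_hulk → Spec_otsime_sagedused meeleolu_sagedused meeleolu_unikaalne_hulk (otsime_sagedused meeleolu_sagedused meeleolu_unikaalne_hulk)

-- ===== LEMMAS AND PROOFS =====

-- folding with an 'if p x' guard = folding over the filtered list
theorem foldl_if_eq_foldl_filter {α β : Type} (p : α → Bool) (f : β → α → β) :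
    ∀ (l : List α) (init : β),
      l.foldl (fun acc x => if p x then f acc x else acc) init = (l.filter p).foldl f init := by
  intro l
  induction l with
  | nil => intro init; rfl
  | cons x xs ih =>
    intro init
    by_cases h : p x = true
    · simp [h, ih]
    · simp [h, ih]

-- folding the inner lists one after another = folding the flattened list
theorem foldl_foldl_eq_foldl_flatMap {α β γ : Type} (g : α → List γ) (f : β → γ → β) :
    ∀ (l : List α) (init : β),
      l.foldl (fun acc a => (g a).foldl f acc) init = (l.flatMap g).foldl f init := by
  intro l
  induction l with
  | nil => intro init; rfl
  | cons x xs ih =>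
    intro init
    simp [List.flatMap_cons, List.foldl_append, ih]

-- what B's one-pass bucket dictionary holds at sentiment i
theorem bysent_getD (d : List (String × List (String × Int))) (i : String) :
    ∀ (bs : PySem.Dict String (List (String × (String × Int)))),
      (d.foldl (fun bs a =>
          a.2.foldl (fun bs b => bs.modify b.1 [] (· ++ [(a.1, b)])) bs) bs).getD i []
        = bs.getD i [] ++ d.flatMap (fun a => (a.2.filter (fun b => b.1 == i)).map (fun b => (a.1, b))) := by
  induction d with
  | nil => intro bs; simp
  | cons a rest ih =>
    intro bs
    rw [List.foldl_cons, ih]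
    have h1 : a.2.foldl (fun bs b => bs.modify b.1 [] (· ++ [(a.1, b)])) bs
        = (a.2.map (fun b => (b.1, (a.1, b)))).foldl (fun d p => d.modify p.1 [] (· ++ [p.2])) bs := by
      rw [List.foldl_map]
    rw [h1, PySem.Dict.getD_foldl_modify_append]
    simp [List.flatMap_cons, List.filter_map, Function.comp_def]

-- A's per-sentiment triple scan = folding B's bucket for that sentiment
theorem step_eq (d : List (String × List (String × Int))) (i : String)
    (res : PySem.Dict String (List (String × Int))) :
    d.foldl (fun res a =>
        a.2.foldl (fun res b =>
          if b.1 == i then res.modify a.1 [] (· ++ [b]) else res) res) res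
      = (d.flatMap (fun a => (a.2.filter (fun b => b.1 == i)).map (fun b => (a.1, b)))).foldl
          (fun res ab => res.modify ab.1 [] (· ++ [ab.2])) res := by
  rw [← foldl_foldl_eq_foldl_flatMap]
  apply PySem.List.foldl_congr_mem
  · intro acc a _
    rw [List.foldl_map, foldl_if_eq_foldl_filter]

-- ===== VERDICT (by name: the statement is the Claim_ definition above) =====
theorem otsime_sagedused_spec : Claim_equal_otsime_sagedused := by
  intro d u _
  unfold Spec_otsime_sagedused otsime_sagedused otsime_sagedused_alt
  congr 1
  apply PySem.List.foldl_congr_mem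
  intro res i _
  rw [step_eq, bysent_getD]
  simp
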